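-- pv_equiv track=rewrite | github.com/Rkiouak/hackerrank | saveprincess/botClean.py | findClosestDirty
-- ===== SOURCE A (Python) =====
-- def findClosestDirty(mLoc, grid):
--     dirtyLocs = []
--     for i in range(len(grid)):
--         for j in range(len(grid[i])):
--             if grid[i][j]=='d':
--                 dirtyLocs.append([i,j])
--     closest=[99999999,[999999,999999]]
--     for loc in dirtyLocs:
--         distance=(abs(mLoc[0]-loc[0])+abs(mLoc[1]-loc[1]))
--         if distance<closest[0]:
--             closest[0]=distance
--             closest[1]=loc
--     return closest[1]
-- ===== SOURCE B (Python) =====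
-- def findClosestDirty(mLoc, grid):
--     # Candidate list: a default entry plus one (distance, [i, j]) per dirty cell;
--     # a stable sort on the distance brings the first-seen nearest candidate to the front.
--     cands = [(99999999, [999999, 999999])]
--     for i, row in enumerate(grid):
--         for j, cell in enumerate(row):
--             if cell == 'd':
--                 cands.append((abs(mLoc[0] - i) + abs(mLoc[1] - j), [i, j]))
--     cands.sort(key=lambda t: t[0])
--     return cands[0][1]
-- ===== Notes on version B (the rewrite author's own statement) =====
-- stated objective: alternative
-- what changed: Replaces A's running-minimum scan over a collected coordinate list by a selection via stable sorting: B builds one candidate list (a default entry plus (distance, location) pairs), sorts it stably by distance and returns the first entry's location, relying on sort stability for A's first-minimum tie-breaking.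
import Mathlib
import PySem

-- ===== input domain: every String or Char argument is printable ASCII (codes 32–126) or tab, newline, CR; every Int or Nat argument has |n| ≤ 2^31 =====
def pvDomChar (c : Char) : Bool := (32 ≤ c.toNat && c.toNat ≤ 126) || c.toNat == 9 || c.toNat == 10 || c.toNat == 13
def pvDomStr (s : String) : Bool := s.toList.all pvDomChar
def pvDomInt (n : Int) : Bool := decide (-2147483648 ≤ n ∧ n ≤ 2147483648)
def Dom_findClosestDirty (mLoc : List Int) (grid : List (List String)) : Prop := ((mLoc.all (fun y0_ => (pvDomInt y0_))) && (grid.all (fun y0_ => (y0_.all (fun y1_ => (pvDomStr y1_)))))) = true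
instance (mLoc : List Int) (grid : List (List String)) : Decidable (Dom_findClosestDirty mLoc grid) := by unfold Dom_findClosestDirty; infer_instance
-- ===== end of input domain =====

-- B selects the nearest dirty cell by stably sorting one candidate list (default entry +
-- (distance, location) pairs) instead of A's running-minimum scan (objective: alternative).

-- ===== PORT A =====
def findClosestDirty (mLoc : List Int) (grid : List (List String)) : List Int :=
  let dirtyLocs : List (List Int) :=
    (PySem.List.pyRange 0 (PySem.List.len grid) 1).foldl (fun acc i =>
      let row := PySem.List.pyGetD grid i []
      (PySem.List.pyRange 0 (PySem.List.len row) 1).foldl (fun acc2 j =>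
        if PySem.List.pyGetD row j "" == "d" then acc2 ++ [[i, j]] else acc2) acc) []
  let closest : Int × List Int :=
    dirtyLocs.foldl (fun c loc =>
      let distance := |PySem.List.pyGetD mLoc 0 0 - PySem.List.pyGetD loc 0 0| +
                      |PySem.List.pyGetD mLoc 1 0 - PySem.List.pyGetD loc 1 0|
      if distance < c.1 then (distance, loc) else c) (99999999, [999999, 999999])
  closest.2

-- ===== PORT B =====
def findClosestDirty_alt (mLoc : List Int) (grid : List (List String)) : List Int :=
  let cands : List (Int × List Int) :=
    (PySem.List.enumerate grid 0).foldl (fun acc p =>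
      (PySem.List.enumerate p.2 0).foldl (fun acc2 q =>
        if q.2 == "d" then
          acc2 ++ [(|PySem.List.pyGetD mLoc 0 0 - p.1| + |PySem.List.pyGetD mLoc 1 0 - q.1|, [p.1, q.1])]
        else acc2) acc) [(99999999, [999999, 999999])]
  let sortedCands := PySem.List.sorted cands (fun t => t.1) false
  (PySem.List.pyGetD sortedCands 0 (0, [])).2

-- ===== PRECONDITION & SPEC =====
-- Pre_ excludes exactly the inputs where Python A raises IndexError: a dirty cell exists
-- but mLoc has fewer than two entries (mLoc[0]/mLoc[1] fail); B raises identically there.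
def Pre_findClosestDirty (mLoc : List Int) (grid : List (List String)) : Prop :=
  2 ≤ mLoc.length ∨ ∀ row ∈ grid, "d" ∉ row
instance (mLoc : List Int) (grid : List (List String)) : Decidable (Pre_findClosestDirty mLoc grid) := by unfold Pre_findClosestDirty; infer_instance
def pvWitness_findClosestDirty : List Int × List (List String) := ([0, 0], [["-", "d"], ["d", "-"]])

def Spec_findClosestDirty (mLoc : List Int) (grid : List (List String)) (out : List Int) : Prop := out = findClosestDirty_alt mLoc grid
instance (mLoc : List Int) (grid : List (List String)) (out : List Int) : Decidable (Spec_findClosestDirty mLoc grid out) := by unfold Spec_findClosestDirty; infer_instance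

-- ===== CLAIM (what is proved, stated in full; the proofs are below) =====
def Claim_equal_findClosestDirty : Prop := ∀ (mLoc : List Int) (grid : List (List String)), Dom_findClosestDirty mLoc grid → Pre_findClosestDirty mLoc grid → Spec_findClosestDirty mLoc grid (findClosestDirty mLoc grid)

-- ===== LEMMAS AND PROOFS =====

-- the first-minimum step both results reduce to (new element y against current best m)
def pvMinStep (m y : Int × List Int) : Int × List Int := if y.1 < m.1 then y else m

-- head of insertBy depends only on the head of the target list
theorem pv_head_insertBy (key : Int × List Int → Int) (x : Int × List Int) (ys : List (Int × List Int)) :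
    (PySem.List.insertBy (fun a b => decide (key a < key b)) x ys).head? =
      match ys.head? with
      | none => some x
      | some y => if key x < key y then some x else some y := by
  cases ys with
  | nil => rfl
  | cons y t =>
      simp only [PySem.List.insertBy]
      by_cases h : key x < key y <;> simp [h]

-- head of an insertion-sort fold is the first-minimum fold of the head?s
theorem pv_head_foldl_ins (key : Int × List Int → Int) :
    ∀ (xs : List (Int × List Int)) (acc : List (Int × List Int)),
      (xs.foldl (fun a x => PySem.List.insertBy (fun a b => decide (key a < key b)) x a) acc).head? =
        xs.foldl (fun m x =>
          match m with
          | none => some x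
          | some y => if key x < key y then some x else some y) acc.head? := by
  intro xs
  induction xs with
  | nil => intro acc; rfl
  | cons x t ih =>
      intro acc
      simp only [List.foldl_cons]
      rw [ih]
      congr 1
      rw [pv_head_insertBy]

-- the optional first-minimum fold started at some x is the plain one started at x
theorem pv_foldl_opt (key : Int × List Int → Int) :
    ∀ (s : List (Int × List Int)) (x : Int × List Int),
      s.foldl (fun m y =>
          match m with
          | none => some y
          | some z => if key y < key z then some y else some z) (some x) =
        some (s.foldl (fun m y => if key y < key m then y else m) x) := by
  intro s
  induction s with
  | nil => intro x; rfl
  | cons y t ih =>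
      intro x
      simp only [List.foldl_cons]
      by_cases hy : key y < key x <;> simp only [hy, if_pos, if_false] <;> rw [ih]

-- head of Python's stable sort of (x :: t) is the first-minimum scan starting at x
theorem pv_head_sorted (key : Int × List Int → Int) (x : Int × List Int) (t : List (Int × List Int)) :
    (PySem.List.sorted (x :: t) key false).head? =
      some (t.foldl (fun m y => if key y < key m then y else m) x) := by
  rw [PySem.List.sorted_eq_foldl_insertBy, List.foldl_cons, pv_head_foldl_ins]
  have h : (PySem.List.insertBy (fun a b => decide (key a < key b)) x []).head? = some x := rfl
  rw [h, pv_foldl_opt key t x]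

-- A's dirty-cell list equals a flatMap of per-row filtered enumerations
theorem pvDirty_eq (grid : List (List String)) :
    (PySem.List.pyRange 0 (PySem.List.len grid) 1).foldl (fun acc i =>
        let row := PySem.List.pyGetD grid i []
        (PySem.List.pyRange 0 (PySem.List.len row) 1).foldl (fun acc2 j =>
          if PySem.List.pyGetD row j "" == "d" then acc2 ++ [[i, j]] else acc2) acc) [] =
      (PySem.List.enumerate grid).flatMap (fun p =>
        ((PySem.List.enumerate p.2).filter (fun q => q.2 == "d")).map (fun q => [p.1, q.1])) := by
  rw [PySem.List.foldl_congr_mem _ _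
      (fun acc i => acc ++ (((PySem.List.enumerate (PySem.List.pyGetD grid i [])).filter
        (fun q => q.2 == "d")).map (fun q => [i, q.1]))) _ ?_]
  · rw [PySem.List.foldl_append_eq_flatMap, List.nil_append,
        PySem.List.enumerate_eq_map_pyRange grid [], List.flatMap_map]
  · intro acc i _
    show (PySem.List.pyRange 0 (PySem.List.len (PySem.List.pyGetD grid i [])) 1).foldl _ acc = _
    have h := @List.foldl_map Int (Int × String) (List (List Int))
      (fun j => (j, PySem.List.pyGetD (PySem.List.pyGetD grid i []) j ""))
      (fun acc2 q => if q.2 == "d" then acc2 ++ [[i, q.1]] else acc2)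
      (PySem.List.pyRange 0 (PySem.List.len (PySem.List.pyGetD grid i []))) acc
    rw [← h, ← PySem.List.enumerate_eq_map_pyRange (PySem.List.pyGetD grid i []) "",
        PySem.List.foldl_append_if]

-- the common (distance, location) candidate pairs, row-major
def pvPairs (mLoc : List Int) (grid : List (List String)) : List (Int × List Int) :=
  (PySem.List.enumerate grid).flatMap (fun p =>
    ((PySem.List.enumerate p.2).filter (fun q => q.2 == "d")).map (fun q =>
      (|PySem.List.pyGetD mLoc 0 0 - p.1| + |PySem.List.pyGetD mLoc 1 0 - q.1|, [p.1, q.1])))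

-- A's result is the first-minimum scan over pvPairs starting at the default candidate
theorem pvA_eq (mLoc : List Int) (grid : List (List String)) :
    findClosestDirty mLoc grid =
      ((pvPairs mLoc grid).foldl pvMinStep (99999999, [999999, 999999])).2 := by
  show ((((PySem.List.pyRange 0 (PySem.List.len grid) 1).foldl (fun acc i =>
      let row := PySem.List.pyGetD grid i []
      (PySem.List.pyRange 0 (PySem.List.len row) 1).foldl (fun acc2 j =>
        if PySem.List.pyGetD row j "" == "d" then acc2 ++ [[i, j]] else acc2) acc) []).foldl
      (fun c loc =>
        let distance := |PySem.List.pyGetD mLoc 0 0 - PySem.List.pyGetD loc 0 0| +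
                        |PySem.List.pyGetD mLoc 1 0 - PySem.List.pyGetD loc 1 0|
        if distance < c.1 then (distance, loc) else c) (99999999, [999999, 999999])).2 : List Int) = _
  rw [pvDirty_eq]
  have hmap : pvPairs mLoc grid =
      ((PySem.List.enumerate grid).flatMap (fun p =>
        ((PySem.List.enumerate p.2).filter (fun q => q.2 == "d")).map (fun q => [p.1, q.1]))).map
        (fun loc => (|PySem.List.pyGetD mLoc 0 0 - PySem.List.pyGetD loc 0 0| +
                     |PySem.List.pyGetD mLoc 1 0 - PySem.List.pyGetD loc 1 0|, loc)) := by
    unfold pvPairs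
    rw [List.map_flatMap]
    congr 1
    funext p
    rw [List.map_map]
    congr 1
  have hfold : ((PySem.List.enumerate grid).flatMap (fun p =>
        ((PySem.List.enumerate p.2).filter (fun q => q.2 == "d")).map (fun q => [p.1, q.1]))).foldl
        (fun c loc =>
          let distance := |PySem.List.pyGetD mLoc 0 0 - PySem.List.pyGetD loc 0 0| +
                          |PySem.List.pyGetD mLoc 1 0 - PySem.List.pyGetD loc 1 0|
          if distance < c.1 then (distance, loc) else c) (99999999, [999999, 999999]) =
      (pvPairs mLoc grid).foldl pvMinStep (99999999, [999999, 999999]) := by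
    rw [hmap, List.foldl_map]
    rfl
  rw [hfold]

-- B's candidate list is the default candidate in front of pvPairs
theorem pvB_cands_eq (mLoc : List Int) (grid : List (List String)) :
    (PySem.List.enumerate grid 0).foldl (fun acc p =>
        (PySem.List.enumerate p.2 0).foldl (fun acc2 q =>
          if q.2 == "d" then
            acc2 ++ [(|PySem.List.pyGetD mLoc 0 0 - p.1| + |PySem.List.pyGetD mLoc 1 0 - q.1|, [p.1, q.1])]
          else acc2) acc) [(99999999, [999999, 999999])] =
      (99999999, [999999, 999999]) :: pvPairs mLoc grid := by
  rw [PySem.List.foldl_congr_mem _ _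
      (fun acc p => acc ++ (((PySem.List.enumerate p.2).filter (fun q => q.2 == "d")).map (fun q =>
        (|PySem.List.pyGetD mLoc 0 0 - p.1| + |PySem.List.pyGetD mLoc 1 0 - q.1|, [p.1, q.1])))) _ ?_]
  · rw [PySem.List.foldl_append_eq_flatMap]
    rfl
  · intro acc p _
    exact PySem.List.foldl_append_if (fun (q : Int × String) => q.2 == "d")
      (fun q => (|PySem.List.pyGetD mLoc 0 0 - p.1| + |PySem.List.pyGetD mLoc 1 0 - q.1|, [p.1, q.1]))
      (PySem.List.enumerate p.2 0) acc

theorem findClosestDirty_eq (mLoc : List Int) (grid : List (List String)) :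
    findClosestDirty mLoc grid = findClosestDirty_alt mLoc grid := by
  rw [pvA_eq]
  show _ = (PySem.List.pyGetD (PySem.List.sorted
      ((PySem.List.enumerate grid 0).foldl (fun acc p =>
        (PySem.List.enumerate p.2 0).foldl (fun acc2 q =>
          if q.2 == "d" then
            acc2 ++ [(|PySem.List.pyGetD mLoc 0 0 - p.1| + |PySem.List.pyGetD mLoc 1 0 - q.1|, [p.1, q.1])]
          else acc2) acc) [(99999999, [999999, 999999])]) (fun t => t.1) false) 0 (0, [])).2
  rw [pvB_cands_eq]
  have hh := pv_head_sorted (fun t => t.1) (99999999, [999999, 999999]) (pvPairs mLoc grid)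
  obtain ⟨rest, hrest⟩ : ∃ rest, PySem.List.sorted
      ((99999999, [999999, 999999]) :: pvPairs mLoc grid) (fun t => t.1) false =
      ((pvPairs mLoc grid).foldl (fun m y => if y.1 < m.1 then y else m)
        (99999999, [999999, 999999])) :: rest := by
    cases hs : PySem.List.sorted ((99999999, [999999, 999999]) :: pvPairs mLoc grid)
        (fun t => t.1) false with
    | nil => rw [hs] at hh; simp at hh
    | cons a rest =>
        rw [hs] at hh
        simp only [List.head?_cons, Option.some.injEq] at hh
        exact ⟨rest, by rw [hh]⟩
  rw [hrest]
  have : PySem.List.pyGetD (((pvPairs mLoc grid).foldl (fun m y => if y.1 < m.1 then y else m)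
      (99999999, [999999, 999999])) :: rest) 0 (0, ([] : List Int)) =
      (pvPairs mLoc grid).foldl (fun m y => if y.1 < m.1 then y else m)
        (99999999, [999999, 999999]) := by
    simp [PySem.List.pyGetD]
  rw [this]
  rfl

-- ===== VERDICT (by name: the statement is the Claim_ definition above) =====
theorem findClosestDirty_spec : Claim_equal_findClosestDirty := by
  intro mLoc grid _ _
  exact findClosestDirty_eq mLoc grid
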